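-- pv_equiv track=rewrite | github.com/JParrales/mision-tic-2021-ciclo_python | G55/Unidad-4/debuggin.py | divisores
-- ===== SOURCE A (Python) =====
-- def divisores(num):
--
--     divisores = {}
--
--     for i in range(1, num + 1):
--
--         divisores[i] = {}
--
--         for x in range(1, i + 1):
--             if i % x == 0:
--                 divisores[i].update({x: x**2})
--     return divisores
-- ===== SOURCE B (Python) =====
-- def divisores(num):
--     # Sieve: one pass per divisor d over its multiples, instead of testing every x <= i for every i.
--     res = {i: {} for i in range(1, num + 1)}
--     for d in range(1, num + 1):
--         sq = d ** 2
--         for m in range(d, num + 1, d):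
--             res[m][d] = sq
--     return res
-- ===== Notes on version B (the rewrite author's own statement) =====
-- stated objective: faster
-- what changed: Replaced the per-number scan of all candidates up to i (a divisibility test for every pair) by a sieve that, for each divisor d, walks only the multiples of d and records d with its square there.
import Mathlib
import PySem

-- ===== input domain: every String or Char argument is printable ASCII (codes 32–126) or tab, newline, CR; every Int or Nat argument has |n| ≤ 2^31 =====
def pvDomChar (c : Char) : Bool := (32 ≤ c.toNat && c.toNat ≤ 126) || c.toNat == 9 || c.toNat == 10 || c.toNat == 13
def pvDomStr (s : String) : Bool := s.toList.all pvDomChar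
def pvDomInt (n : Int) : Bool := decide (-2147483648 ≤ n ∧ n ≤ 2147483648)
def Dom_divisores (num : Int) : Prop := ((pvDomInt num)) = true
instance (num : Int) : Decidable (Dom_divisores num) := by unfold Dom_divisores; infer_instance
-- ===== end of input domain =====

-- B replaces A's per-number scan of all candidates x ≤ i by a sieve over multiples of each divisor d (objective: faster).

-- ===== PORT A =====
def divisores (num : Int) : List (Int × List (Int × Int)) :=
  let dv := (PySem.List.pyRange 1 (num + 1)).foldl
    (fun dv i =>
      let dv := dv.insert i PySem.Dict.empty
      (PySem.List.pyRange 1 (i + 1)).foldl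
        (fun dv x =>
          if PySem.Int.mod i x = 0 then
            dv.modify i PySem.Dict.empty (fun inn => inn.insert x (x ^ 2))
          else dv) dv)
    (PySem.Dict.empty : PySem.Dict Int (PySem.Dict Int Int))
  dv.items.map (fun p => (p.1, p.2.items))

-- ===== PORT B =====
def divisores_alt (num : Int) : List (Int × List (Int × Int)) :=
  let r0 : PySem.Dict Int (PySem.Dict Int Int) :=
    (PySem.List.pyRange 1 (num + 1)).foldl (fun r i => r.insert i PySem.Dict.empty) PySem.Dict.empty
  let r := (PySem.List.pyRange 1 (num + 1)).foldl
    (fun r d =>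
      let sq := d ^ 2
      (PySem.List.pyRange d (num + 1) d).foldl
        (fun r m => r.modify m PySem.Dict.empty (fun inn => inn.insert d sq)) r) r0
  r.items.map (fun p => (p.1, p.2.items))

-- ===== PRECONDITION & SPEC =====
def Spec_divisores (num : Int) (out : List (Int × List (Int × Int))) : Prop := out = divisores_alt num
instance (num : Int) (out : List (Int × List (Int × Int))) : Decidable (Spec_divisores num out) := by unfold Spec_divisores; infer_instance

-- ===== CLAIM (what is proved, stated in full; the proofs are below) =====
def Claim_equal_divisores : Prop := ∀ (num : Int), Dom_divisores num → Spec_divisores num (divisores num)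

-- ===== LEMMAS AND PROOFS =====

-- the divisors-dict of k, as A builds it: keys in ascending order, values the squares
def innD (k : Int) : PySem.Dict Int Int :=
  ((PySem.List.pyRange 1 (k + 1)).filter (fun x => decide (PySem.Int.mod k x = 0))).foldl
    (fun inn x => inn.insert x (x ^ 2)) PySem.Dict.empty

-- the divisors-dict of k, as the sieve of B builds it
def innB (num k : Int) : PySem.Dict Int Int :=
  ((PySem.List.pyRange 1 (num + 1)).filter (fun d => decide (k ∈ PySem.List.pyRange d (num + 1) d))).foldl
    (fun inn d => inn.insert d (d ^ 2)) PySem.Dict.empty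

-- A's inner loop, started on dv.insert i v, just rebuilds the value at key i
theorem fold_modify_insert (l : List Int) (i : Int) (dv : PySem.Dict Int (PySem.Dict Int Int))
    (v : PySem.Dict Int Int) :
    l.foldl (fun dv x =>
        if PySem.Int.mod i x = 0 then
          dv.modify i PySem.Dict.empty (fun inn => inn.insert x (x ^ 2))
        else dv) (dv.insert i v)
      = dv.insert i (l.foldl (fun inn x =>
          if PySem.Int.mod i x = 0 then inn.insert x (x ^ 2) else inn) v) := by
  induction l generalizing v with
  | nil => rfl
  | cons x t ih =>
    simp only [List.foldl_cons]
    by_cases h : PySem.Int.mod i x = 0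
    · simp only [h, if_pos trivial]
      rw [show (dv.insert i v).modify i PySem.Dict.empty (fun inn => inn.insert x (x ^ 2))
            = dv.insert i (v.insert x (x ^ 2)) by
          simp [PySem.Dict.modify, PySem.Dict.getD_insert_self, PySem.Dict.insert_insert_self]]
      exact ih (v.insert x (x ^ 2))
    · simp only [h, if_false]
      exact ih v

theorem refA (num : Int) :
    divisores num = (PySem.List.pyRange 1 (num + 1)).map (fun i => (i, (innD i).items)) := by
  simp only [divisores]
  have hstep : (fun (dv : PySem.Dict Int (PySem.Dict Int Int)) (i : Int) =>
      (PySem.List.pyRange 1 (i + 1)).foldl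
        (fun dv x =>
          if PySem.Int.mod i x = 0 then
            dv.modify i PySem.Dict.empty (fun inn => inn.insert x (x ^ 2))
          else dv) (dv.insert i PySem.Dict.empty))
      = (fun dv i => dv.insert i (innD i)) := by
    funext dv i
    rw [fold_modify_insert]
    congr 1
    rw [PySem.List.foldl_ite_eq_foldl_filter]
    rfl
  rw [hstep, PySem.Dict.items_foldl_insert_fresh (PySem.List.pyRange 1 (num + 1))
        (fun i => i) innD PySem.Dict.empty
        (fun a _ => PySem.Dict.contains_empty a)
        (by simpa using PySem.List.nodup_pyRange_one 1 (num + 1))]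
  simp [List.map_map, Function.comp, PySem.Dict.empty]

-- a fold of modify over a duplicate-free list, seen through getD
theorem fold_modify_getD (l : List Int) (hnd : l.Nodup) (k : Int)
    (f : PySem.Dict Int Int → PySem.Dict Int Int) (r : PySem.Dict Int (PySem.Dict Int Int)) :
    (l.foldl (fun r m => r.modify m PySem.Dict.empty f) r).getD k PySem.Dict.empty
      = if k ∈ l then f (r.getD k PySem.Dict.empty) else r.getD k PySem.Dict.empty := by
  induction l generalizing r with
  | nil => simp
  | cons m t ih =>
    simp only [List.foldl_cons, List.mem_cons]
    have hnd' := hnd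
    rw [List.nodup_cons] at hnd'
    rw [ih hnd'.2]
    by_cases hkt : k ∈ t
    · have hkm : k ≠ m := fun h => hnd'.1 (h ▸ hkt)
      simp [hkt, hkm, PySem.Dict.getD_modify]
    · by_cases hkm : k = m
      · subst hkm
        simp [hkt]
      · simp [hkt, hkm, PySem.Dict.getD_modify]

theorem pyRange_pos_nodup (a b s : Int) (hs : 0 < s) : (PySem.List.pyRange a b s).Nodup := by
  rw [PySem.List.pyRange_of_pos a b hs]
  refine List.Nodup.map ?_ (List.nodup_range)
  intro p q h
  have h2 : s * (p : Int) = s * (q : Int) := by linarith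
  have := mul_left_cancel₀ (ne_of_gt hs) h2
  exact_mod_cast this

theorem set_update_subset (l s : List Int) (h : ∀ x ∈ l, x ∈ s) : PySem.Set.update s l = s := by
  induction l with
  | nil => rfl
  | cons x t ih =>
    have hx : x ∈ s := h x (.head t)
    have hadd : PySem.Set.add s x = s := by
      simp [PySem.Set.add, PySem.Set.contains, hx]
    show List.foldl PySem.Set.add s (x :: t) = s
    rw [List.foldl_cons]
    show PySem.Set.update (PySem.Set.add s x) t = s
    rw [hadd]
    exact ih (fun y hy => h y (.tail x hy))

-- the sieve phase does not change the key list 1..num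
theorem sieve_keys (num : Int) (DL : List Int) (hpos : ∀ d ∈ DL, 0 < d)
    (r : PySem.Dict Int (PySem.Dict Int Int)) (hr : r.keys = PySem.List.pyRange 1 (num + 1)) :
    (DL.foldl (fun r d =>
        (PySem.List.pyRange d (num + 1) d).foldl
          (fun r m => r.modify m PySem.Dict.empty (fun inn => inn.insert d (d ^ 2))) r) r).keys
      = PySem.List.pyRange 1 (num + 1) := by
  induction DL generalizing r with
  | nil => simpa using hr
  | cons d t ih =>
    rw [List.foldl_cons]
    apply ih (fun x hx => hpos x (.tail d hx))
    rw [PySem.Dict.keys_foldl_modify (PySem.List.pyRange d (num + 1) d) PySem.Dict.empty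
          (fun _ _ inn => PySem.Dict.insert inn d (d ^ 2)) r, hr]
    apply set_update_subset
    intro m hm
    rw [PySem.List.mem_pyRange_iff_of_pos (hpos d (.head t))] at hm
    rw [PySem.List.mem_pyRange_one]
    have := hpos d (.head t)
    omega

-- the sieve phase, observed at one key k
theorem sieve_getD (num : Int) (DL : List Int) (hpos : ∀ d ∈ DL, 0 < d) (k : Int)
    (r : PySem.Dict Int (PySem.Dict Int Int)) :
    (DL.foldl (fun r d =>
        (PySem.List.pyRange d (num + 1) d).foldl
          (fun r m => r.modify m PySem.Dict.empty (fun inn => inn.insert d (d ^ 2))) r) r).getD k PySem.Dict.empty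
      = (DL.filter (fun d => decide (k ∈ PySem.List.pyRange d (num + 1) d))).foldl
          (fun inn d => inn.insert d (d ^ 2)) (r.getD k PySem.Dict.empty) := by
  induction DL generalizing r with
  | nil => rfl
  | cons d t ih =>
    rw [List.foldl_cons, List.filter_cons]
    have hmul := fold_modify_getD (PySem.List.pyRange d (num + 1) d)
      (pyRange_pos_nodup d (num + 1) d (hpos d (.head t))) k
      (fun inn => inn.insert d (d ^ 2)) r
    by_cases hk : k ∈ PySem.List.pyRange d (num + 1) d
    · rw [ih (fun x hx => hpos x (.tail d hx)), hmul, if_pos hk]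
      simp [hk]
    · rw [ih (fun x hx => hpos x (.tail d hx)), hmul, if_neg hk]
      simp [hk]

theorem refB (num : Int) :
    divisores_alt num = (PySem.List.pyRange 1 (num + 1)).map (fun k => (k, (innB num k).items)) := by
  simp only [divisores_alt]
  have hpos : ∀ d ∈ PySem.List.pyRange 1 (num + 1), (0 : Int) < d := by
    intro d hd
    rw [PySem.List.mem_pyRange_one] at hd
    omega
  have h0items : ((PySem.List.pyRange 1 (num + 1)).foldl
      (fun r i => r.insert i (PySem.Dict.empty : PySem.Dict Int Int)) PySem.Dict.empty).items
      = (PySem.List.pyRange 1 (num + 1)).map (fun i => (i, (PySem.Dict.empty : PySem.Dict Int Int))) := by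
    rw [PySem.Dict.items_foldl_insert_fresh (PySem.List.pyRange 1 (num + 1))
          (fun i => i) (fun _ => PySem.Dict.empty) PySem.Dict.empty
          (fun a _ => PySem.Dict.contains_empty a)
          (by simpa using PySem.List.nodup_pyRange_one 1 (num + 1))]
    rfl
  have h0keys : ((PySem.List.pyRange 1 (num + 1)).foldl
      (fun r i => r.insert i (PySem.Dict.empty : PySem.Dict Int Int)) PySem.Dict.empty).keys
      = PySem.List.pyRange 1 (num + 1) := by
    simp only [PySem.Dict.keys, h0items, List.map_map]
    exact List.map_id _
  have hkeys := sieve_keys num (PySem.List.pyRange 1 (num + 1)) hpos _ h0keys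
  have hnd : (PySem.List.pyRange 1 (num + 1)).Nodup := PySem.List.nodup_pyRange_one 1 (num + 1)
  rw [PySem.Dict.items_eq_map_keys _ (by rw [hkeys]; exact hnd) PySem.Dict.empty, hkeys,
    List.map_map]
  apply List.map_congr_left
  intro k hk
  have h0getD : ((PySem.List.pyRange 1 (num + 1)).foldl
      (fun r i => r.insert i (PySem.Dict.empty : PySem.Dict Int Int)) PySem.Dict.empty).getD k PySem.Dict.empty
      = PySem.Dict.empty := by
    apply PySem.Dict.getD_of_mem_items
    · rw [h0items]
      exact List.mem_map.mpr ⟨k, hk, rfl⟩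
    · rw [h0keys]
      exact hnd
  simp only [Function.comp]
  rw [sieve_getD num (PySem.List.pyRange 1 (num + 1)) hpos k _, h0getD]
  rfl

theorem innB_eq_innD (num k : Int) (h1 : 1 ≤ k) (h2 : k ≤ num) : innB num k = innD k := by
  unfold innB innD
  congr 1
  rw [PySem.List.pyRange_one_append 1 (k + 1) (num + 1) (by omega) (by omega), List.filter_append]
  have htail : (PySem.List.pyRange (k + 1) (num + 1)).filter
      (fun d => decide (k ∈ PySem.List.pyRange d (num + 1) d)) = [] := by
    rw [List.filter_eq_nil_iff]
    intro d hd
    rw [PySem.List.mem_pyRange_one] at hd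
    simp only [decide_eq_true_eq]
    intro hmem
    rw [PySem.List.mem_pyRange_iff_of_pos (by omega : (0:Int) < d)] at hmem
    omega
  rw [htail, List.append_nil]
  apply List.filter_congr
  intro x hx
  rw [PySem.List.mem_pyRange_one] at hx
  simp only [decide_eq_decide]
  rw [PySem.List.mem_pyRange_iff_of_pos (by omega : (0:Int) < x), PySem.Int.mod_eq_zero_iff_dvd]
  constructor
  · rintro ⟨_, _, hdvd⟩
    have : x ∣ (k - x) + x := dvd_add hdvd dvd_rfl
    simpa using this
  · intro hdvd
    exact ⟨by omega, by omega, dvd_sub hdvd dvd_rfl⟩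

-- ===== VERDICT (by name: the statement is the Claim_ definition above) =====
theorem divisores_spec : Claim_equal_divisores := by
  intro num _
  show divisores num = divisores_alt num
  rw [refA num, refB num]
  apply List.map_congr_left
  intro k hk
  rw [PySem.List.mem_pyRange_one] at hk
  rw [innB_eq_innD num k hk.1 (by omega)]
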